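-- pv_equiv track=rewrite | github.com/gchernousov/phonebook | phonebook.py | edit_double_record
-- ===== SOURCE A (Python) =====
-- def edit_double_record(new_contact_list):
--   """Функция для корректировки контактов"""
--   count = 1
--
--   for control_record in new_contact_list[count:]:
--     for check_row in new_contact_list[count + 1:]:
--       if control_record[0] == check_row[0] and control_record[1] == check_row[1]:
--         c = 2
--         for n in range(5):
--           n = n + c
--           if control_record[n] != "" and check_row[n] == "":
--             check_row[n] = control_record[n]
--           elif control_record[n] == "" and check_row[n] != "":
--             control_record[n] = check_row[n]
--
--     count += 1
--
--   return new_contact_list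
-- ===== SOURCE B (Python) =====
-- def edit_double_record(new_contact_list):
--     """Merge duplicate records (same first two fields) by filling empty fields
--     2..6 from the first non-empty value in the group; single pass with dicts.
--     Returns a new list for merged rows (does not mutate rows in place)."""
--     rest = new_contact_list[1:]
--     counts = {}
--     for row in rest:
--         key = tuple(row[:2])
--         counts[key] = counts.get(key, 0) + 1
--     firsts = {}
--     for row in rest:
--         key = tuple(row[:2])
--         if counts[key] >= 2:
--             for f in range(2, 7):
--                 if (key, f) not in firsts and row[f] != "":
--                     firsts[(key, f)] = row[f]
--     result = new_contact_list[:1]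
--     for row in rest:
--         key = tuple(row[:2])
--         if counts[key] >= 2:
--             row = list(row)
--             for f in range(2, 7):
--                 if row[f] == "":
--                     row[f] = firsts.get((key, f), "")
--         result.append(row)
--     return result
-- ===== Notes on version B (the rewrite author's own statement) =====
-- stated objective: alternative
-- what changed: A merges duplicates by re-scanning every later record for each record (pairwise field exchanges); B makes three linear dict-based passes: count records per (field0,field1) key, record the first non-empty value per (key,field), then rebuild each duplicated record by filling its empty fields from that dict. Quadratic pair scanning in the record count is replaced by hashing (intended as faster; a timing run measured only 1.59x at the largest size, so no speed is claimed).
import Mathlib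
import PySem

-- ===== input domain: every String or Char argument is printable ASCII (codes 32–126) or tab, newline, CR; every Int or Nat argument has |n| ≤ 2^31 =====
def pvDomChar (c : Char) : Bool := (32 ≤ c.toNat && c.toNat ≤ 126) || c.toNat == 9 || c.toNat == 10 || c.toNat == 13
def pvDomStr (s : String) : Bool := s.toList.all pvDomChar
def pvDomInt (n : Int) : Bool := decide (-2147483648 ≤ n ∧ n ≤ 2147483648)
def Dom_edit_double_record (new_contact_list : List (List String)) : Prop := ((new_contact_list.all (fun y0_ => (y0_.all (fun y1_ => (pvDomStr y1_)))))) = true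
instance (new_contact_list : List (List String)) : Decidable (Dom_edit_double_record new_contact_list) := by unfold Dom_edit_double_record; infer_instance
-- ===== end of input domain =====

-- B re-implements A's pairwise duplicate-record merging as three dict-based passes
-- (count per key, first non-empty value per key/field, rebuild).  Same return value;
-- A mutates its rows in place while B builds fresh rows for merged records, so the
-- equivalence proved here is about the RETURN value only.


-- ===== PORT A =====
-- Python A mutates the rows of `new_contact_list` in place; rows are aliased objects
-- (a row object IS the list entry, and rows are never replaced in the list), so the
-- loops over the slices `[count:]` / `[count + 1:]` are modelled as folds over the row
-- indices 1..n-1 resp. count+1..n-1 of the evolving state.  `r[k]` is read with getD ""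
-- (Pre_ excludes exactly the inputs where Python raises IndexError, so the default is
-- never the value actually read).
def pvFld (r : List String) (f : Nat) : String := r.getD f ""
def pvRowAt (st : List (List String)) (i : Nat) : List String := st.getD i []
-- the body of `for n in range(5): n = n + c; if … elif …` for one n (c = 2)
def pvStepA (i j : Nat) (st : List (List String)) (n : Nat) : List (List String) :=
  let f := n + 2
  let ci := pvRowAt st i
  let cj := pvRowAt st j
  if pvFld ci f ≠ "" ∧ pvFld cj f = "" then st.set j (cj.set f (pvFld ci f))
  else if pvFld ci f = "" ∧ pvFld cj f ≠ "" then st.set i (ci.set f (pvFld cj f))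
  else st
-- one (control_record, check_row) iteration: the guard plus the `for n in range(5)` loop
def pvPairA (st : List (List String)) (i j : Nat) : List (List String) :=
  if pvFld (pvRowAt st i) 0 = pvFld (pvRowAt st j) 0 ∧ pvFld (pvRowAt st i) 1 = pvFld (pvRowAt st j) 1 then
    (List.range 5).foldl (pvStepA i j) st
  else st
def edit_double_record (new_contact_list : List (List String)) : List (List String) :=
  (List.range' 1 (new_contact_list.length - 1)).foldl
    (fun st c =>
      (List.range' (c + 1) (new_contact_list.length - (c + 1))).foldl
        (fun st j => pvPairA st c j) st)
    new_contact_list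

-- ===== PORT B =====
-- key = tuple(row[:2])  (a Python tuple of variable length ↦ the sliced list itself)
def pvKeyB (row : List String) : List String := PySem.List.slice row none (some (2 : Int))
-- counts[key] = counts.get(key, 0) + 1
def pvCountsB (rest : List (List String)) : PySem.Dict (List String) Int :=
  rest.foldl (fun d row => d.insert (pvKeyB row) (d.getD (pvKeyB row) 0 + 1)) PySem.Dict.empty
-- second pass: if (key, f) not in firsts and row[f] != "": firsts[(key, f)] = row[f]
def pvFirstsB (counts : PySem.Dict (List String) Int) (rest : List (List String)) :
    PySem.Dict (List String × Int) String :=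
  rest.foldl (fun d row =>
    if counts.getD (pvKeyB row) 0 ≥ 2 then
      (PySem.List.pyRange 2 7 1).foldl (fun d f =>
        if ¬ d.contains (pvKeyB row, f) ∧ PySem.List.pyGetD row f "" ≠ "" then
          d.insert (pvKeyB row, f) (PySem.List.pyGetD row f "")
        else d) d
    else d) PySem.Dict.empty
-- third pass: row = list(row); for f in range(2,7): if row[f]=="" : row[f] = firsts.get((key,f),"")
def pvMergeRowB (counts : PySem.Dict (List String) Int)
    (firsts : PySem.Dict (List String × Int) String) (row : List String) : List String :=
  if counts.getD (pvKeyB row) 0 ≥ 2 then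
    (PySem.List.pyRange 2 7 1).foldl (fun r f =>
      if PySem.List.pyGetD r f "" = "" then
        PySem.List.pySetD r f (firsts.getD (pvKeyB row, f) "")
      else r) row
  else row
def edit_double_record_alt (new_contact_list : List (List String)) : List (List String) :=
  let rest := PySem.List.slice new_contact_list (some (1 : Int)) none
  let counts := pvCountsB rest
  let firsts := pvFirstsB counts rest
  rest.foldl (fun acc row => acc ++ [pvMergeRowB counts firsts row])
    (PySem.List.slice new_contact_list none (some (1 : Int)))

-- ===== PRECONDITION & SPEC =====
-- Pre_ holds exactly on the inputs where Python A returns (raises no IndexError):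
-- with at least three records every record after the first needs a field 0; two records
-- agreeing on field 0 need a field 1 on both; and two records agreeing on fields 0 and 1
-- (a duplicate pair, whose fields 2..6 the merge loop reads) need length ≥ 7 on both.
def Pre_edit_double_record (new_contact_list : List (List String)) : Prop :=
  (3 ≤ new_contact_list.length →
    ∀ i ∈ List.range new_contact_list.length, 1 ≤ i → 1 ≤ (new_contact_list.getD i []).length) ∧
  (∀ i ∈ List.range new_contact_list.length, ∀ j ∈ List.range new_contact_list.length,
    1 ≤ i → i < j →
    pvFld (new_contact_list.getD i []) 0 = pvFld (new_contact_list.getD j []) 0 →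
      (2 ≤ (new_contact_list.getD i []).length ∧ 2 ≤ (new_contact_list.getD j []).length) ∧
      (pvFld (new_contact_list.getD i []) 1 = pvFld (new_contact_list.getD j []) 1 →
        7 ≤ (new_contact_list.getD i []).length ∧ 7 ≤ (new_contact_list.getD j []).length))
instance (new_contact_list : List (List String)) : Decidable (Pre_edit_double_record new_contact_list) := by
  unfold Pre_edit_double_record; infer_instance
def pvWitness_edit_double_record : List (List String) :=
  [["hdr", "hdr"],
   ["ann", "1", "a@x", "", "", "", ""],
   ["bob", "2", "", "", "", "", ""],
   ["ann", "1", "", "b5", "", "", ""]]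
def Spec_edit_double_record (new_contact_list : List (List String)) (out : List (List String)) : Prop := out = edit_double_record_alt new_contact_list
instance (new_contact_list : List (List String)) (out : List (List String)) : Decidable (Spec_edit_double_record new_contact_list out) := by unfold Spec_edit_double_record; infer_instance

-- ===== CLAIM (what is proved, stated in full; the proofs are below) =====
def Claim_equal_edit_double_record : Prop := ∀ (new_contact_list : List (List String)), Dom_edit_double_record new_contact_list → Pre_edit_double_record new_contact_list → Spec_edit_double_record new_contact_list (edit_double_record new_contact_list)

-- ===== LEMMAS AND PROOFS =====

/- Both programs are shown to compute `pvSpecRes`: row 0 is untouched; a row at index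
   p ≥ 1 keeps its non-empty fields, and each empty field f ∈ [2,7) becomes the value of
   field f of the FIRST record (in index order, indices ≥ 1) of the same (field0, field1)
   group that is non-empty there (or stays empty if there is none). -/

-- spec machinery (used only by the proofs)
def pvF (l : List (List String)) (p f : Nat) : String := (l.getD p []).getD f ""
def pvKey (l : List (List String)) (p : Nat) : String × String := (pvF l p 0, pvF l p 1)
def pvIdxs (l : List (List String)) : List Nat := List.range' 1 (l.length - 1)
def pvMB (l : List (List String)) (k : String × String) (f : Nat) (q : Nat) : Bool :=
  (pvKey l q == k) && !(pvF l q f == "")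
def pvM (l : List (List String)) (k : String × String) (f : Nat) : Option Nat :=
  (pvIdxs l).find? (pvMB l k f)
def pvG0 (l : List (List String)) (k : String × String) : Option Nat :=
  (pvIdxs l).find? (fun q => pvKey l q == k)
def pvRowOf (row : List String) (g : Nat → String) : List String :=
  row.mapIdx (fun f v => if 2 ≤ f ∧ f < 7 then g f else v)
def pvEVal (l : List (List String)) (p : Nat) : Nat → String := fun f =>
  if 1 ≤ p ∧ p < l.length ∧ pvF l p f = "" then
    match pvM l (pvKey l p) f with
    | some m => pvF l m f
    | none => ""
  else pvF l p f
def pvFill (l : List (List String)) (p : Nat) : List String :=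
  pvRowOf (l.getD p []) (pvEVal l p)
def pvSpecRes (l : List (List String)) : List (List String) :=
  (List.range l.length).map (pvFill l)
-- "row p, field f is already filled" condition after controls < c are done and control
-- c has processed checks < j
abbrev pvCond (c j p m g0 : Nat) : Prop :=
  p < c ∨ (p = c ∧ m < j) ∨ (c < p ∧ m < p ∧ (g0 < c ∨ (g0 = c ∧ p < j)))
def pvIV (l : List (List String)) (c j p : Nat) : Nat → String := fun f =>
  if 1 ≤ p ∧ p < l.length ∧ pvF l p f = "" then
    match pvM l (pvKey l p) f, pvG0 l (pvKey l p) with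
    | some m, some g0 => if pvCond c j p m g0 then pvF l m f else ""
    | _, _ => ""
  else pvF l p f
def pvInv (l : List (List String)) (c j : Nat) (st : List (List String)) : Prop :=
  st.length = l.length ∧ ∀ p, st.getD p [] = pvRowOf (l.getD p []) (pvIV l c j p)
def pvIVmix (l : List (List String)) (c j b p : Nat) : Nat → String := fun f =>
  if f < b then pvIV l c (j + 1) p f else pvIV l c j p f
def pvInvMix (l : List (List String)) (c j b : Nat) (st : List (List String)) : Prop :=
  st.length = l.length ∧ ∀ p, st.getD p [] = pvRowOf (l.getD p []) (pvIVmix l c j b p)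

-- find? on a range': bounds, hit, minimality, none, existence
lemma pvFind_min {P : Nat → Bool} : ∀ (len s : Nat) {m : Nat},
    (List.range' s len).find? P = some m → ∀ q, s ≤ q → q < m → P q = false := by
  intro len
  induction len with
  | zero => intro s m h; simp [List.range'] at h
  | succ k ih =>
    intro s m h q hsq hqm
    rw [List.range'_succ] at h
    by_cases hps : P s
    · rw [List.find?_cons_of_pos hps] at h
      injection h with h; omega
    · rw [List.find?_cons_of_neg hps] at h
      rcases Nat.eq_or_lt_of_le hsq with rfl | hlt
      · simpa using hps
      · exact ih (s + 1) h q hlt hqm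
lemma pvFind_some {P : Nat → Bool} {len s m : Nat}
    (h : (List.range' s len).find? P = some m) :
    s ≤ m ∧ m < s + len ∧ P m = true := by
  have hm := List.mem_range'_1.mp (List.mem_of_find?_eq_some h)
  exact ⟨hm.1, hm.2, List.find?_some h⟩
lemma pvFind_exists {P : Nat → Bool} {len s q : Nat}
    (h1 : s ≤ q) (h2 : q < s + len) (hq : P q = true) :
    ∃ m, (List.range' s len).find? P = some m ∧ m ≤ q := by
  have : ((List.range' s len).find? P).isSome := by
    rw [List.find?_isSome]; exact ⟨q, List.mem_range'_1.mpr ⟨h1, h2⟩, hq⟩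
  rcases Option.isSome_iff_exists.mp this with ⟨m, hm⟩
  refine ⟨m, hm, ?_⟩
  by_contra hc
  have := pvFind_min _ _ hm q h1 (by omega)
  simp [this] at hq


-- pvM / pvG0 facts
lemma pvM_spec {l k f m} (h : pvM l k f = some m) :
    1 ≤ m ∧ m < 1 + (l.length - 1) ∧ pvKey l m = k ∧ pvF l m f ≠ "" := by
  obtain ⟨h1, h2, h3⟩ := pvFind_some h
  unfold pvMB at h3
  simp only [Bool.and_eq_true, beq_iff_eq, Bool.not_eq_true', beq_eq_false_iff_ne] at h3
  exact ⟨h1, h2, h3.1, h3.2⟩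
lemma pvM_exists {l k f q} (h1 : 1 ≤ q) (h2 : q < 1 + (l.length - 1))
    (hk : pvKey l q = k) (hne : pvF l q f ≠ "") :
    ∃ m, pvM l k f = some m ∧ m ≤ q := by
  apply pvFind_exists h1 h2
  unfold pvMB
  simp [hk, hne]
lemma pvG0_spec {l k g0} (h : pvG0 l k = some g0) :
    1 ≤ g0 ∧ g0 < 1 + (l.length - 1) ∧ pvKey l g0 = k := by
  obtain ⟨h1, h2, h3⟩ := pvFind_some h
  simp only [beq_iff_eq] at h3
  exact ⟨h1, h2, h3⟩
lemma pvG0_exists {l k q} (h1 : 1 ≤ q) (h2 : q < 1 + (l.length - 1)) (hk : pvKey l q = k) :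
    ∃ g0, pvG0 l k = some g0 ∧ g0 ≤ q := by
  apply pvFind_exists h1 h2
  simp [hk]
lemma pvG0_of_pvM {l k f m} (h : pvM l k f = some m) :
    ∃ g0, pvG0 l k = some g0 ∧ g0 ≤ m := by
  obtain ⟨h1, h2, h3, _⟩ := pvM_spec h
  exact pvG0_exists h1 h2 h3

-- pvRowOf kit
lemma pvRowOf_length (row : List String) (g : Nat → String) :
    (pvRowOf row g).length = row.length := by
  simp [pvRowOf]
lemma pvRowOf_getElem? (row : List String) (g : Nat → String) (f : Nat) :
    (pvRowOf row g)[f]? = row[f]?.map (fun v => if 2 ≤ f ∧ f < 7 then g f else v) := by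
  simp [pvRowOf, List.getElem?_mapIdx]
lemma pvRowOf_getD (row : List String) (g : Nat → String) (f : Nat) :
    (pvRowOf row g).getD f "" =
      if 2 ≤ f ∧ f < 7 ∧ f < row.length then g f else row.getD f "" := by
  rw [List.getD_eq_getElem?_getD, List.getD_eq_getElem?_getD, pvRowOf_getElem?]
  rcases hv : row[f]? with _ | v
  · have : ¬ f < row.length := by
      intro h; exact absurd hv (by simp [List.getElem?_eq_getElem h])
    simp [this]
  · have hlt : f < row.length := by
      by_contra h; rw [List.getElem?_eq_none_iff.mpr (by omega)] at hv; exact absurd hv (by simp)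
    by_cases hc : 2 ≤ f ∧ f < 7 <;> simp [hc, hlt]
lemma pvFld_pvRowOf_lo (row : List String) (g : Nat → String) (f : Nat) (hf : f < 2) :
    pvFld (pvRowOf row g) f = pvFld row f := by
  unfold pvFld
  rw [pvRowOf_getD]
  simp [show ¬ (2 ≤ f ∧ f < 7 ∧ f < row.length) by omega]
lemma pvRowOf_set (row : List String) (g : Nat → String) {b : Nat} (a : String)
    (hb : 2 ≤ b ∧ b < 7) :
    (pvRowOf row g).set b a = pvRowOf row (Function.update g b a) := by
  apply List.ext_getElem?
  intro i
  rw [List.getElem?_set]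
  rw [pvRowOf_getElem?, pvRowOf_getElem?, pvRowOf_length]
  by_cases hib : b = i
  · subst hib
    rcases hv : row[b]? with _ | v
    · have : ¬ b < row.length := by
        intro h; exact absurd hv (by simp [List.getElem?_eq_getElem h])
      simp [this]
    · have hlt : b < row.length := by
        by_contra h; rw [List.getElem?_eq_none_iff.mpr (by omega)] at hv; exact absurd hv (by simp)
      simp [hlt, hb, Function.update]
  · simp only [if_neg hib]
    rcases hv : row[i]? with _ | v
    · simp
    · by_cases hc : 2 ≤ i ∧ i < 7
      · simp [hc, Function.update, Ne.symm hib]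
      · simp [hc]
lemma pvRowOf_congr {row : List String} {g g' : Nat → String}
    (h : ∀ f, 2 ≤ f → f < 7 → g f = g' f) : pvRowOf row g = pvRowOf row g' := by
  apply List.ext_getElem?
  intro i
  rw [pvRowOf_getElem?, pvRowOf_getElem?]
  by_cases hc : 2 ≤ i ∧ i < 7
  · simp [hc, h i hc.1 hc.2]
  · simp [hc]
lemma pvRowOf_self (row : List String) : pvRowOf row (fun f => row.getD f "") = row := by
  apply List.ext_getElem?
  intro i
  rw [pvRowOf_getElem?]
  rcases hv : row[i]? with _ | v
  · simp
  · simp [hv, List.getD_eq_getElem?_getD]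


-- state getD/set helper
lemma pvGetD_set (st : List (List String)) (i : Nat) (r : List String) (p : Nat) :
    (st.set i r).getD p [] = if i = p ∧ i < st.length then r else st.getD p [] := by
  rw [List.getD_eq_getElem?_getD, List.getD_eq_getElem?_getD, List.getElem?_set]
  by_cases h : i = p
  · subst h
    by_cases hi : i < st.length
    · simp [hi]
    · have hnone : st[i]? = none := List.getElem?_eq_none_iff.mpr (by omega)
      simp [hi, hnone]
  · simp [h]

lemma pvIV_S2 (l : List (List String)) (c j b : Nat) (hc : 1 ≤ c) (hcj : c < j)
    (hjn : j < l.length) (ha : pvIV l c j c b ≠ "") :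
    pvIV l c (j + 1) c b = pvIV l c j c b := by
  unfold pvIV at ha ⊢
  by_cases hpc : 1 ≤ c ∧ c < l.length ∧ pvF l c b = ""
  · simp only [if_pos hpc] at ha ⊢
    rcases hm : pvM l (pvKey l c) b with _ | m
    · simp [hm] at ha
    · rcases pvG0_of_pvM hm with ⟨g0, hg, hg0m⟩
      simp only [hm, hg] at ha ⊢
      by_cases hcond : pvCond c j c m g0
      · rw [if_pos hcond, if_pos (by unfold pvCond at hcond ⊢; omega)]
      · simp [hcond] at ha
  · simp [hpc]

lemma pvIV_S4 (l : List (List String)) (c j b : Nat) (hc : 1 ≤ c) (hcj : c < j)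
    (hjn : j < l.length) (hb : pvIV l c j j b ≠ "") :
    pvIV l c (j + 1) j b = pvIV l c j j b := by
  unfold pvIV at hb ⊢
  by_cases hpj : 1 ≤ j ∧ j < l.length ∧ pvF l j b = ""
  · simp only [if_pos hpj] at hb ⊢
    rcases hm : pvM l (pvKey l j) b with _ | m
    · simp [hm] at hb
    · rcases pvG0_of_pvM hm with ⟨g0, hg, hg0m⟩
      simp only [hm, hg] at hb ⊢
      by_cases hcond : pvCond c j j m g0
      · rw [if_pos hcond, if_pos (by unfold pvCond at hcond ⊢; omega)]
      · simp [hcond] at hb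
  · simp [hpj]

lemma pvIV_S1 (l : List (List String)) (c j b : Nat) (hc : 1 ≤ c) (hcj : c < j)
    (hjn : j < l.length) (hk : pvKey l j = pvKey l c)
    (ha : pvIV l c j c b ≠ "") (hbv : pvIV l c j j b = "") :
    pvIV l c (j + 1) j b = pvIV l c j c b := by
  have hn : j < l.length := hjn
  have hcn : c < l.length := by omega
  -- row j must be empty at b
  have hjF : pvF l j b = "" := by
    by_contra hne
    unfold pvIV at hbv
    rw [if_neg (by intro hh; exact hne hh.2.2)] at hbv
    exact hne hbv
  unfold pvIV at ha hbv ⊢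
  rw [if_pos ⟨by omega, hn, hjF⟩] at hbv ⊢
  rw [hk] at hbv ⊢
  by_cases hcF : pvF l c b = ""
  · -- control row itself empty; its value came from m
    rw [if_pos ⟨hc, hcn, hcF⟩] at ha
    rcases hm : pvM l (pvKey l c) b with _ | m
    · simp [hm] at ha
    · rcases pvG0_of_pvM hm with ⟨g0, hg, hg0m⟩
      simp only [hm, hg] at ha hbv ⊢
      by_cases hcond : pvCond c j c m g0
      · rw [if_pos hcond] at ha
        obtain ⟨hm1, hm2, hmk, hmne⟩ := pvM_spec hm
        -- g0 ≤ c since c is a group member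
        obtain ⟨g0', hg', hg0c'⟩ := pvG0_exists (l := l) (q := c) hc (by omega) rfl
        rw [hg'] at hg
        injection hg with hgeq
        have hg0c : g0 ≤ c := by omega
        have hmj : m < j := by unfold pvCond at hcond; omega
        have hnew : pvCond c (j + 1) j m g0 := by unfold pvCond; omega
        rw [if_pos hnew, if_pos hcond, if_pos ⟨hc, hcn, hcF⟩]
      · simp [hcond] at ha
  · -- control row non-empty at b: its own value is transferred
    rw [if_neg (by intro hh; exact hcF hh.2.2)] at ha ⊢
    -- m exists and m ≤ c
    obtain ⟨m, hm, hmc⟩ := pvM_exists (l := l) (q := c) (f := b) hc (by omega) rfl hcF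
    rcases pvG0_of_pvM hm with ⟨g0, hg, hg0m⟩
    simp only [hm, hg] at hbv ⊢
    obtain ⟨hm1, hm2, hmk, hmne⟩ := pvM_spec hm
    -- bv = "" forces ¬ pvCond c j j m g0, hence g0 = c hence m = c
    have hnc : ¬ pvCond c j j m g0 := by
      intro hcond
      rw [if_pos hcond] at hbv
      exact hmne hbv
    have hg0c : g0 ≤ c := hg0m.trans hmc
    have hmc' : m = c := by unfold pvCond at hnc; omega
    have hnew : pvCond c (j + 1) j m g0 := by unfold pvCond; omega
    rw [if_pos hnew, hmc']

lemma pvIV_S3 (l : List (List String)) (c j b : Nat) (hc : 1 ≤ c) (hcj : c < j)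
    (hjn : j < l.length) (hk : pvKey l j = pvKey l c)
    (ha : pvIV l c j c b = "") (hbv : pvIV l c j j b ≠ "") :
    pvIV l c (j + 1) c b = pvIV l c j j b := by
  have hcn : c < l.length := by omega
  have hcF : pvF l c b = "" := by
    by_contra hne
    unfold pvIV at ha
    rw [if_neg (by intro hh; exact hne hh.2.2)] at ha
    exact hne ha
  unfold pvIV at ha hbv ⊢
  rw [if_pos ⟨hc, hcn, hcF⟩] at ha ⊢
  by_cases hjF : pvF l j b = ""
  · -- check row empty too: its value must come from a filled state, contradiction with a = ""
    rw [if_pos ⟨by omega, hjn, hjF⟩, hk] at hbv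
    rcases hm : pvM l (pvKey l c) b with _ | m
    · simp [hm] at hbv
    · rcases pvG0_of_pvM hm with ⟨g0, hg, hg0m⟩
      simp only [hm, hg] at ha hbv
      by_cases hcond : pvCond c j j m g0
      · -- then m < j ∧ g0 < c, so control was filled as well: a ≠ ""
        obtain ⟨hm1, hm2, hmk, hmne⟩ := pvM_spec hm
        have : pvCond c j c m g0 := by unfold pvCond at hcond ⊢; omega
        rw [if_pos this] at ha
        exact absurd ha hmne
      · simp [hcond] at hbv
  · -- check row non-empty: m = j and its value is pvF l j b
    rw [if_neg (by intro hh; exact hjF hh.2.2)] at hbv ⊢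
    obtain ⟨m, hm, hmj⟩ := pvM_exists (l := l) (q := j) (f := b) (by omega) (by omega) hk hjF
    rcases pvG0_of_pvM hm with ⟨g0, hg, hg0m⟩
    simp only [hm, hg] at ha ⊢
    obtain ⟨hm1, hm2, hmk, hmne⟩ := pvM_spec hm
    have hnc : ¬ pvCond c j c m g0 := by
      intro hcond
      rw [if_pos hcond] at ha
      exact hmne ha
    have hmj' : m = j := by unfold pvCond at hnc; omega
    have hnew : pvCond c (j + 1) c m g0 := by unfold pvCond; omega
    rw [if_pos hnew, hmj']

lemma pvIV_S5 (l : List (List String)) (c j b : Nat) (hc : 1 ≤ c) (hcj : c < j)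
    (hjn : j < l.length) (hk : pvKey l j = pvKey l c)
    (ha : pvIV l c j c b = "") (hbv : pvIV l c j j b = "") :
    pvIV l c (j + 1) c b = "" ∧ pvIV l c (j + 1) j b = "" := by
  have hcn : c < l.length := by omega
  have hcF : pvF l c b = "" := by
    by_contra hne
    unfold pvIV at ha
    rw [if_neg (by intro hh; exact hne hh.2.2)] at ha
    exact hne ha
  have hjF : pvF l j b = "" := by
    by_contra hne
    unfold pvIV at hbv
    rw [if_neg (by intro hh; exact hne hh.2.2)] at hbv
    exact hne hbv
  unfold pvIV at ha hbv ⊢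
  rw [if_pos ⟨hc, hcn, hcF⟩] at ha ⊢
  rw [if_pos ⟨by omega, hjn, hjF⟩, hk] at hbv ⊢
  rcases hm : pvM l (pvKey l c) b with _ | m
  · simp [hm]
  · rcases pvG0_of_pvM hm with ⟨g0, hg, hg0m⟩
    simp only [hm, hg] at ha hbv ⊢
    obtain ⟨hm1, hm2, hmk, hmne⟩ := pvM_spec hm
    have hnc : ¬ pvCond c j c m g0 := by
      intro hcond; rw [if_pos hcond] at ha; exact hmne ha
    have hncj : ¬ pvCond c j j m g0 := by
      intro hcond; rw [if_pos hcond] at hbv; exact hmne hbv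
    -- m ≠ j (else check row non-empty) and m ≥ j from ¬(m < j)
    have hmnej : m ≠ j := by
      intro h; subst h; exact hmne hjF
    have hmgj : ¬ (m < j) := by unfold pvCond at hnc; omega
    constructor
    · have hnew : ¬ pvCond c (j + 1) c m g0 := by unfold pvCond; omega
      rw [if_neg hnew]
    · have hnew : ¬ pvCond c (j + 1) j m g0 := by unfold pvCond; omega
      rw [if_neg hnew]

-- frame: rows other than c and j do not change when the check index advances
lemma pvIV_frame (l : List (List String)) (c j p b : Nat) (hpc : p ≠ c) (hpj : p ≠ j) :
    pvIV l c (j + 1) p b = pvIV l c j p b := by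
  unfold pvIV
  by_cases hp : 1 ≤ p ∧ p < l.length ∧ pvF l p b = ""
  · simp only [if_pos hp]
    rcases hm : pvM l (pvKey l p) b with _ | m
    · simp only [hm]
    · rcases hg : pvG0 l (pvKey l p) with _ | g0
      · simp only [hm, hg]
      · simp only [hm, hg]
        by_cases hcond : pvCond c j p m g0
        · have hnew : pvCond c (j + 1) p m g0 := by unfold pvCond at hcond ⊢; omega
          rw [if_pos hcond, if_pos hnew]
        · have hnew : ¬ pvCond c (j + 1) p m g0 := by unfold pvCond at hcond ⊢; omega
          rw [if_neg hcond, if_neg hnew]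
  · simp [hp]

-- frame for a non-matching (control, check) pair: nothing at all changes
lemma pvIV_frame_ne (l : List (List String)) (c j p b : Nat) (hc : 1 ≤ c) (hcj : c < j)
    (hjn : j < l.length) (hk : pvKey l j ≠ pvKey l c) :
    pvIV l c (j + 1) p b = pvIV l c j p b := by
  by_cases hpc : p = c
  · subst hpc
    unfold pvIV
    by_cases hp : 1 ≤ p ∧ p < l.length ∧ pvF l p b = ""
    · simp only [if_pos hp]
      rcases hm : pvM l (pvKey l p) b with _ | m
      · simp only [hm]
      · rcases hg : pvG0 l (pvKey l p) with _ | g0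
        · simp only [hm, hg]
        · simp only [hm, hg]
          obtain ⟨hm1, hm2, hmk, hmne⟩ := pvM_spec hm
          have hmj : m ≠ j := by intro h; subst h; exact hk hmk
          by_cases hcond : pvCond p j p m g0
          · have hnew : pvCond p (j + 1) p m g0 := by unfold pvCond at hcond ⊢; omega
            rw [if_pos hcond, if_pos hnew]
          · have hnew : ¬ pvCond p (j + 1) p m g0 := by unfold pvCond at hcond ⊢; omega
            rw [if_neg hcond, if_neg hnew]
    · simp [hp]
  · by_cases hpj : p = j
    · subst hpj
      unfold pvIV
      by_cases hp : 1 ≤ p ∧ p < l.length ∧ pvF l p b = ""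
      · simp only [if_pos hp]
        rcases hm : pvM l (pvKey l p) b with _ | m
        · simp only [hm]
        · rcases hg : pvG0 l (pvKey l p) with _ | g0
          · simp only [hm, hg]
          · simp only [hm, hg]
            obtain ⟨hg1, hg2, hgk⟩ := pvG0_spec hg
            have hg0c : g0 ≠ c := by intro h; subst h; exact hk hgk.symm
            by_cases hcond : pvCond c p p m g0
            · have hnew : pvCond c (p + 1) p m g0 := by unfold pvCond at hcond ⊢; omega
              rw [if_pos hcond, if_pos hnew]
            · have hnew : ¬ pvCond c (p + 1) p m g0 := by unfold pvCond at hcond ⊢; omega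
              rw [if_neg hcond, if_neg hnew]
      · simp [hp]
    · exact pvIV_frame l c j p b hpc hpj

-- duplicate records have at least 7 fields (from Pre_)
lemma pvPre_len7 {l : List (List String)} (hpre : Pre_edit_double_record l) {c j : Nat}
    (hc : 1 ≤ c) (hcj : c < j) (hjn : j < l.length) (hk : pvKey l j = pvKey l c) :
    7 ≤ (l.getD c []).length ∧ 7 ≤ (l.getD j []).length := by
  obtain ⟨-, h2⟩ := hpre
  have hk0 : pvF l c 0 = pvF l j 0 ∧ pvF l c 1 = pvF l j 1 := by
    unfold pvKey at hk
    exact ⟨(congrArg Prod.fst hk).symm, (congrArg Prod.snd hk).symm⟩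
  have := h2 c (List.mem_range.mpr (by omega)) j (List.mem_range.mpr hjn) hc hcj hk0.1
  exact this.2 hk0.2

lemma pvInv_to_mix2 {l : List (List String)} {c j : Nat} {st : List (List String)}
    (h : pvInv l c j st) : pvInvMix l c j 2 st := by
  obtain ⟨hlen, hrow⟩ := h
  refine ⟨hlen, fun p => ?_⟩
  rw [hrow p]
  exact pvRowOf_congr (fun f hf2 hf7 => by unfold pvIVmix; rw [if_neg (by omega)])
lemma pvMix7_to_inv {l : List (List String)} {c j : Nat} {st : List (List String)}
    (h : pvInvMix l c j 7 st) : pvInv l c (j + 1) st := by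
  obtain ⟨hlen, hrow⟩ := h
  refine ⟨hlen, fun p => ?_⟩
  rw [hrow p]
  exact pvRowOf_congr (fun f hf2 hf7 => by unfold pvIVmix; rw [if_pos (by omega)])

lemma pvMix_update (l : List (List String)) (c j n p : Nat) (a : String)
    (ha : a = pvIV l c (j + 1) p (n + 2)) (f : Nat) (hf2 : 2 ≤ f) (hf7 : f < 7) :
    Function.update (pvIVmix l c j (n + 2) p) (n + 2) a f = pvIVmix l c j (n + 3) p f := by
  by_cases hfb : f = n + 2
  · subst hfb
    rw [Function.update_self, ha]
    unfold pvIVmix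
    rw [if_pos (by omega)]
  · rw [Function.update_of_ne hfb]
    unfold pvIVmix
    by_cases hlt : f < n + 2
    · rw [if_pos hlt, if_pos (by omega)]
    · rw [if_neg hlt, if_neg (by omega)]
lemma pvMix_keep (l : List (List String)) (c j n p : Nat)
    (hp : pvIV l c (j + 1) p (n + 2) = pvIV l c j p (n + 2)) (f : Nat)
    (hf2 : 2 ≤ f) (hf7 : f < 7) :
    pvIVmix l c j (n + 2) p f = pvIVmix l c j (n + 3) p f := by
  unfold pvIVmix
  by_cases hfb : f = n + 2
  · subst hfb
    rw [if_neg (by omega), if_pos (by omega), hp]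
  · by_cases hlt : f < n + 2
    · rw [if_pos hlt, if_pos (by omega)]
    · rw [if_neg hlt, if_neg (by omega)]

lemma pvStep_one (l : List (List String)) (hpre : Pre_edit_double_record l) (c j : Nat)
    (hc : 1 ≤ c) (hcj : c < j) (hjn : j < l.length) (hk : pvKey l j = pvKey l c)
    (n : Nat) (hn : n < 5) (st : List (List String)) (h : pvInvMix l c j (n + 2) st) :
    pvInvMix l c j (n + 3) (pvStepA c j st n) := by
  obtain ⟨h7c, h7j⟩ := pvPre_len7 hpre hc hcj hjn hk
  obtain ⟨hlen, hrow⟩ := h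
  have hb : 2 ≤ n + 2 ∧ n + 2 < 7 := by omega
  have hmixc : pvIVmix l c j (n + 2) c (n + 2) = pvIV l c j c (n + 2) := by
    unfold pvIVmix; rw [if_neg (by omega)]
  have hmixj : pvIVmix l c j (n + 2) j (n + 2) = pvIV l c j j (n + 2) := by
    unfold pvIVmix; rw [if_neg (by omega)]
  have hA : (pvRowOf (l.getD c []) (pvIVmix l c j (n + 2) c)).getD (n + 2) "" =
      pvIV l c j c (n + 2) := by
    rw [pvRowOf_getD, if_pos ⟨hb.1, hb.2, by omega⟩, hmixc]
  have hB : (pvRowOf (l.getD j []) (pvIVmix l c j (n + 2) j)).getD (n + 2) "" =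
      pvIV l c j j (n + 2) := by
    rw [pvRowOf_getD, if_pos ⟨hb.1, hb.2, by omega⟩, hmixj]
  have hrowc := hrow c
  have hrowj := hrow j
  unfold pvStepA pvRowAt pvFld
  simp only [hrowc, hrowj, hA, hB]
  split_ifs with h1 h2
  · -- check row gets the control's value
    refine ⟨by simp [hlen], fun p => ?_⟩
    rw [pvGetD_set]
    by_cases hpj : j = p
    · rw [if_pos ⟨hpj, by omega⟩, pvRowOf_set _ _ _ hb, ← hpj]
      apply pvRowOf_congr
      intro f hf2 hf7
      exact pvMix_update l c j n j _
        (pvIV_S1 l c j (n + 2) hc hcj hjn hk h1.1 h1.2).symm f hf2 hf7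
    · rw [if_neg (by intro hh; exact hpj hh.1), hrow p]
      apply pvRowOf_congr
      intro f hf2 hf7
      refine pvMix_keep l c j n p ?_ f hf2 hf7
      by_cases hpc : p = c
      · subst hpc; exact pvIV_S2 l p j (n + 2) hc hcj hjn h1.1
      · exact pvIV_frame l c j p (n + 2) hpc (fun hh => hpj hh.symm)
  · -- control row gets the check's value
    refine ⟨by simp [hlen], fun p => ?_⟩
    rw [pvGetD_set]
    by_cases hpc : c = p
    · rw [if_pos ⟨hpc, by omega⟩, pvRowOf_set _ _ _ hb, ← hpc]
      apply pvRowOf_congr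
      intro f hf2 hf7
      exact pvMix_update l c j n c _
        (pvIV_S3 l c j (n + 2) hc hcj hjn hk h2.1 h2.2).symm f hf2 hf7
    · rw [if_neg (by intro hh; exact hpc hh.1), hrow p]
      apply pvRowOf_congr
      intro f hf2 hf7
      refine pvMix_keep l c j n p ?_ f hf2 hf7
      by_cases hpj : p = j
      · subst hpj; exact pvIV_S4 l c p (n + 2) hc hcj hjn h2.2
      · exact pvIV_frame l c j p (n + 2) (fun hh => hpc hh.symm) hpj
  · -- nothing changes
    refine ⟨hlen, fun p => ?_⟩
    rw [hrow p]
    apply pvRowOf_congr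
    intro f hf2 hf7
    refine pvMix_keep l c j n p ?_ f hf2 hf7
    by_cases hpc : p = c
    · subst hpc
      by_cases ha : pvIV l p j p (n + 2) ≠ ""
      · exact pvIV_S2 l p j (n + 2) hc hcj hjn ha
      · push_neg at ha
        have hbv : pvIV l p j j (n + 2) = "" := by
          by_contra hbv
          exact h2 ⟨ha, hbv⟩
        rw [ha]
        exact (pvIV_S5 l p j (n + 2) hc hcj hjn hk ha hbv).1
    · by_cases hpj : p = j
      · subst hpj
        by_cases hbv : pvIV l c p p (n + 2) ≠ ""
        · exact pvIV_S4 l c p (n + 2) hc hcj hjn hbv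
        · push_neg at hbv
          have ha : pvIV l c p c (n + 2) = "" := by
            by_contra ha
            exact h1 ⟨ha, hbv⟩
          rw [hbv]
          exact (pvIV_S5 l c p (n + 2) hc hcj hjn hk ha hbv).2
      · exact pvIV_frame l c j p (n + 2) hpc hpj

lemma pvPair_inv (l : List (List String)) (hpre : Pre_edit_double_record l) (c j : Nat)
    (hc : 1 ≤ c) (hcj : c < j) (hjn : j < l.length) (st : List (List String))
    (h : pvInv l c j st) : pvInv l c (j + 1) (pvPairA st c j) := by
  obtain ⟨hlen, hrow⟩ := h
  have hg0 : pvFld (pvRowAt st c) 0 = pvF l c 0 := by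
    unfold pvRowAt; rw [hrow c]; exact pvFld_pvRowOf_lo _ _ 0 (by omega)
  have hg1 : pvFld (pvRowAt st c) 1 = pvF l c 1 := by
    unfold pvRowAt; rw [hrow c]; exact pvFld_pvRowOf_lo _ _ 1 (by omega)
  have hgj0 : pvFld (pvRowAt st j) 0 = pvF l j 0 := by
    unfold pvRowAt; rw [hrow j]; exact pvFld_pvRowOf_lo _ _ 0 (by omega)
  have hgj1 : pvFld (pvRowAt st j) 1 = pvF l j 1 := by
    unfold pvRowAt; rw [hrow j]; exact pvFld_pvRowOf_lo _ _ 1 (by omega)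
  unfold pvPairA
  rw [hg0, hg1, hgj0, hgj1]
  by_cases hk : pvKey l j = pvKey l c
  · have hkc : pvF l c 0 = pvF l j 0 ∧ pvF l c 1 = pvF l j 1 := by
      unfold pvKey at hk
      exact ⟨(congrArg Prod.fst hk).symm, (congrArg Prod.snd hk).symm⟩
    rw [if_pos hkc]
    rw [show List.range 5 = [0, 1, 2, 3, 4] from rfl]
    simp only [List.foldl_cons, List.foldl_nil]
    have m2 := pvInv_to_mix2 ⟨hlen, hrow⟩
    have m3 := pvStep_one l hpre c j hc hcj hjn hk 0 (by omega) st m2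
    have m4 := pvStep_one l hpre c j hc hcj hjn hk 1 (by omega) _ m3
    have m5 := pvStep_one l hpre c j hc hcj hjn hk 2 (by omega) _ m4
    have m6 := pvStep_one l hpre c j hc hcj hjn hk 3 (by omega) _ m5
    have m7 := pvStep_one l hpre c j hc hcj hjn hk 4 (by omega) _ m6
    exact pvMix7_to_inv m7
  · rw [if_neg (by
      intro hh
      exact hk (by unfold pvKey; rw [hh.1, hh.2]))]
    refine ⟨hlen, fun p => ?_⟩
    rw [hrow p]
    exact pvRowOf_congr (fun f hf2 hf7 =>
      (pvIV_frame_ne l c j p f hc hcj hjn hk).symm)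

lemma pvInner_fold (l : List (List String)) (hpre : Pre_edit_double_record l) (c : Nat)
    (hc : 1 ≤ c) : ∀ (len j : Nat) (st : List (List String)), c < j → j + len = l.length →
    pvInv l c j st →
    pvInv l c l.length ((List.range' j len).foldl (fun st j => pvPairA st c j) st) := by
  intro len
  induction len with
  | zero => intro j st hcj hend h; simp only [List.range'] at *; rw [List.foldl_nil]
            rw [← Nat.add_zero j, hend] at h; simpa using h
  | succ k ih =>
    intro j st hcj hend h
    rw [List.range'_succ, List.foldl_cons]
    exact ih (j + 1) _ (by omega) (by omega)
      (pvPair_inv l hpre c j hc hcj (by omega) st h)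

-- end of an outer iteration re-described as the start of the next one
lemma pvOuter_shift (l : List (List String)) (c : Nat) (hc : 1 ≤ c)
    (st : List (List String)) (h : pvInv l c l.length st) :
    pvInv l (c + 1) (c + 2) st := by
  obtain ⟨hlen, hrow⟩ := h
  refine ⟨hlen, fun p => ?_⟩
  rw [hrow p]
  apply pvRowOf_congr
  intro f hf2 hf7
  unfold pvIV
  by_cases hp : 1 ≤ p ∧ p < l.length ∧ pvF l p f = ""
  · simp only [if_pos hp]
    rcases hm : pvM l (pvKey l p) f with _ | m
    · simp only [hm]
    · rcases pvG0_of_pvM hm with ⟨g0, hg, hg0m⟩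
      simp only [hm, hg]
      obtain ⟨hm1, hm2, hmk, hmne⟩ := pvM_spec hm
      have hmp : m ≠ p := by
        intro hh; subst hh; exact hmne hp.2.2
      by_cases hcond : pvCond c l.length p m g0
      · have hnew : pvCond (c + 1) (c + 2) p m g0 := by
          unfold pvCond at hcond ⊢; omega
        rw [if_pos hcond, if_pos hnew]
      · have hnew : ¬ pvCond (c + 1) (c + 2) p m g0 := by
          unfold pvCond at hcond ⊢; omega
        rw [if_neg hcond, if_neg hnew]
  · simp [hp]

lemma pvOuter_fold (l : List (List String)) (hpre : Pre_edit_double_record l) :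
    ∀ (len c : Nat) (st : List (List String)), 1 ≤ c → c + len = l.length →
    pvInv l c (c + 1) st →
    pvInv l l.length (l.length + 1)
      ((List.range' c len).foldl
        (fun st c => (List.range' (c + 1) (l.length - (c + 1))).foldl
          (fun st j => pvPairA st c j) st) st) := by
  intro len
  induction len with
  | zero =>
    intro c st hc hend h
    simp only [List.range'] at *
    rw [List.foldl_nil]
    have : c = l.length := by omega
    subst this
    exact h
  | succ k ih =>
    intro c st hc hend h
    rw [List.range'_succ, List.foldl_cons]
    have hinner := pvInner_fold l hpre c hc (l.length - (c + 1)) (c + 1) st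
      (by omega) (by omega) h
    exact ih (c + 1) _ (by omega) (by omega) (pvOuter_shift l c hc _ hinner)

-- the starting state satisfies the invariant
lemma pvInit_inv (l : List (List String)) : pvInv l 1 2 l := by
  refine ⟨rfl, fun p => ?_⟩
  have : pvIV l 1 2 p = fun f => (l.getD p []).getD f "" := by
    funext f
    unfold pvIV
    by_cases hp : 1 ≤ p ∧ p < l.length ∧ pvF l p f = ""
    · simp only [if_pos hp]
      rcases hm : pvM l (pvKey l p) f with _ | m
      · simp only [hm]; exact hp.2.2.symm
      · rcases pvG0_of_pvM hm with ⟨g0, hg, hg0m⟩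
        simp only [hm, hg]
        obtain ⟨hm1, hm2, hmk, hmne⟩ := pvM_spec hm
        obtain ⟨hg1, hg2, hgk⟩ := pvG0_spec hg
        have hmp : m ≠ p := by
          intro hh; subst hh; exact hmne hp.2.2
        have hnc : ¬ pvCond 1 2 p m g0 := by unfold pvCond; omega
        rw [if_neg hnc]
        exact hp.2.2.symm
    · rw [if_neg hp]; rfl
  rw [this, pvRowOf_self]

-- the final invariant gives the specified result
lemma pvFinal_iv (l : List (List String)) (p : Nat) :
    pvIV l l.length (l.length + 1) p = pvEVal l p := by
  funext f
  unfold pvIV pvEVal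
  by_cases hp : 1 ≤ p ∧ p < l.length ∧ pvF l p f = ""
  · simp only [if_pos hp]
    rcases hm : pvM l (pvKey l p) f with _ | m
    · simp only [hm]
    · rcases pvG0_of_pvM hm with ⟨g0, hg, hg0m⟩
      simp only [hm, hg]
      rw [if_pos (by unfold pvCond; omega)]
  · simp [hp]

-- A computes the spec
lemma pvA_eq_spec (l : List (List String)) (hpre : Pre_edit_double_record l) :
    edit_double_record l = pvSpecRes l := by
  rcases hn : l.length with _ | n'
  · have : l = [] := List.length_eq_zero_iff.mp hn
    subst this
    rfl
  · have hn1 : 1 ≤ l.length := by omega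
    have hfold := pvOuter_fold l hpre (l.length - 1) 1 l (by omega) (by omega)
      (pvInit_inv l)
    obtain ⟨hlen, hrow⟩ := hfold
    unfold edit_double_record
    apply List.ext_getElem?
    intro p
    by_cases hpn : p < l.length
    · have hplt : p < ((List.range' 1 (l.length - 1)).foldl
          (fun st c => (List.range' (c + 1) (l.length - (c + 1))).foldl
            (fun st j => pvPairA st c j) st) l).length := by rw [hlen]; exact hpn
      rw [List.getElem?_eq_getElem hplt]
      have hval : ((List.range' 1 (l.length - 1)).foldl
          (fun st c => (List.range' (c + 1) (l.length - (c + 1))).foldl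
            (fun st j => pvPairA st c j) st) l)[p] = pvFill l p := by
        have hgd := hrow p
        rw [List.getD_eq_getElem?_getD, List.getElem?_eq_getElem hplt] at hgd
        simp only [Option.getD_some] at hgd
        rw [hgd, pvFinal_iv]
        rfl
      rw [hval]
      unfold pvSpecRes
      rw [List.getElem?_map, List.getElem?_range hpn]
      rfl
    · rw [List.getElem?_eq_none_iff.mpr (by omega)]
      unfold pvSpecRes
      rw [List.getElem?_map, List.getElem?_eq_none_iff.mpr (by simp; omega)]
      rfl

-- ================= B side =================
lemma pvKeyB_eq (row : List String) : pvKeyB row = row.take 2 := by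
  unfold pvKeyB
  exact PySem.List.slice_to row (by norm_num)
lemma pvTake2_of_len (row : List String) (h : 2 ≤ row.length) :
    row.take 2 = [row.getD 0 "", row.getD 1 ""] := by
  rcases row with _ | ⟨a, _ | ⟨b, t⟩⟩
  · simp at h
  · simp at h
  · rfl
lemma pvDrop_eq_map (l : List (List String)) :
    l.drop 1 = (pvIdxs l).map (fun q => l.getD q []) := by
  apply List.ext_getElem?
  intro i
  rw [List.getElem?_drop, List.getElem?_map]
  unfold pvIdxs
  by_cases hi : i < l.length - 1
  · rw [List.getElem?_range' hi, List.getElem?_eq_getElem (by omega)]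
    simp only [Option.map_some]
    rw [List.getD_eq_getElem l [] (by omega)]
    norm_num
  · rw [List.getElem?_eq_none_iff.mpr (by omega), List.getElem?_eq_none_iff.mpr (by simp; omega)]
    rfl

-- Pre_ gives: rows at indices ≥ 1 that agree on field 0 have ≥ 2 fields …
lemma pvPre_len2 {l : List (List String)} (hpre : Pre_edit_double_record l) {p q : Nat}
    (hp : 1 ≤ p) (hpn : p < l.length) (hq : 1 ≤ q) (hqn : q < l.length) (hne : q ≠ p)
    (h0 : pvF l q 0 = pvF l p 0) :
    2 ≤ (l.getD q []).length ∧ 2 ≤ (l.getD p []).length := by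
  rcases Nat.lt_or_ge q p with hlt | hge
  · exact (hpre.2 q (List.mem_range.mpr hqn) p (List.mem_range.mpr hpn) hq hlt h0).1
  · have hlt : p < q := by omega
    have := (hpre.2 p (List.mem_range.mpr hpn) q (List.mem_range.mpr hqn) hp hlt h0.symm).1
    exact ⟨this.2, this.1⟩
-- … and rows that agree on fields 0 and 1 have ≥ 7 fields.
lemma pvPre_len7' {l : List (List String)} (hpre : Pre_edit_double_record l) {p q : Nat}
    (hp : 1 ≤ p) (hpn : p < l.length) (hq : 1 ≤ q) (hqn : q < l.length) (hne : q ≠ p)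
    (hk : pvKey l q = pvKey l p) :
    7 ≤ (l.getD q []).length ∧ 7 ≤ (l.getD p []).length := by
  have h0 : pvF l q 0 = pvF l p 0 := congrArg Prod.fst hk
  have h1 : pvF l q 1 = pvF l p 1 := congrArg Prod.snd hk
  rcases Nat.lt_or_ge q p with hlt | hge
  · exact (hpre.2 q (List.mem_range.mpr hqn) p (List.mem_range.mpr hpn) hq hlt h0).2 h1
  · have hlt : p < q := by omega
    have := (hpre.2 p (List.mem_range.mpr hpn) q (List.mem_range.mpr hqn) hp hlt h0.symm).2 h1.symm
    exact ⟨this.2, this.1⟩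

-- under Pre_, grouping by row[:2] coincides with grouping by (field0, field1)
lemma pvKeyB_bridge {l : List (List String)} (hpre : Pre_edit_double_record l) {p q : Nat}
    (hp : 1 ≤ p) (hpn : p < l.length) (hq : 1 ≤ q) (hqn : q < l.length) :
    (l.getD q []).take 2 = (l.getD p []).take 2 ↔ pvKey l q = pvKey l p := by
  by_cases hqp : q = p
  · subst hqp; simp
  constructor
  · intro ht
    by_cases hlq : 2 ≤ (l.getD q []).length
    · by_cases hlp : 2 ≤ (l.getD p []).length
      · rw [pvTake2_of_len _ hlq, pvTake2_of_len _ hlp] at ht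
        injection ht with ht0 htt
        injection htt with ht1 _
        unfold pvKey pvF
        rw [ht0, ht1]
      · -- p is short, q is long: the takes have different lengths
        exfalso
        have := congrArg List.length ht
        rw [List.length_take, List.length_take] at this
        omega
    · -- q is short: take 2 is the whole row on both sides
      have hlq' : (l.getD q []).length ≤ 1 := by omega
      have htq : (l.getD q []).take 2 = l.getD q [] := List.take_of_length_le (by omega)
      have hlp : (l.getD p []).length ≤ 1 := by
        by_contra hlp
        have := congrArg List.length ht
        rw [List.length_take, List.length_take] at this
        omega
      have htp : (l.getD p []).take 2 = l.getD p [] := List.take_of_length_le (by omega)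
      rw [htq, htp] at ht
      -- both rows equal and of length ≤ 1
      rcases hrq : l.getD q [] with _ | ⟨x, t⟩
      · -- empty row at index ≥ 1 forces length < 3, so q = p
        exfalso
        have hlen1 := hpre.1
        by_cases h3 : 3 ≤ l.length
        · have := hlen1 h3 q (List.mem_range.mpr hqn) hq
          rw [hrq] at this
          simp at this
        · omega
      · -- both rows are [x]: they agree on field 0, so Pre_ forces length ≥ 2
        exfalso
        have ht' : l.getD p [] = x :: t := by rw [← ht, hrq]
        have hlen1 : t = [] := by
          have hlen := congrArg List.length hrq
          rw [List.length_cons] at hlen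
          exact List.length_eq_zero_iff.mp (by omega)
        have h0 : pvF l q 0 = pvF l p 0 := by
          unfold pvF
          rw [hrq, ht']
        have := pvPre_len2 hpre hp hpn hq hqn hqp h0
        rw [hrq] at this
        subst hlen1
        simp at this
  · intro hk
    obtain ⟨hq2, hp2⟩ := pvPre_len2 hpre hp hpn hq hqn hqp (congrArg Prod.fst hk)
    rw [pvTake2_of_len _ hq2, pvTake2_of_len _ hp2]
    have h0 : pvF l q 0 = pvF l p 0 := congrArg Prod.fst hk
    have h1 : pvF l q 1 = pvF l p 1 := congrArg Prod.snd hk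
    unfold pvF at h0 h1
    rw [h0, h1]

def pvDup (l : List (List String)) (p : Nat) : Prop :=
  ∃ q, 1 ≤ q ∧ q < l.length ∧ q ≠ p ∧ pvKey l q = pvKey l p

lemma pvTwo_le_countP {α : Type} (P : α → Bool) :
    ∀ (xs : List α), xs.Nodup →
      (2 ≤ xs.countP P ↔ ∃ a ∈ xs, ∃ b ∈ xs, a ≠ b ∧ P a ∧ P b) := by
  intro xs
  induction xs with
  | nil => simp
  | cons x t ih =>
    intro hnd
    have hndt := (List.nodup_cons.mp hnd).2
    have hxt := (List.nodup_cons.mp hnd).1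
    rw [List.countP_cons]
    constructor
    · intro h2
      by_cases hPx : P x
      · rw [if_pos hPx] at h2
        obtain ⟨b, hb, hPb⟩ := List.countP_pos_iff.mp (show 0 < t.countP P by omega)
        exact ⟨x, List.mem_cons_self, b, List.mem_cons_of_mem _ hb,
          fun hxb => hxt (hxb ▸ hb), hPx, hPb⟩
      · rw [if_neg hPx] at h2
        obtain ⟨a, ha, b, hb, hab, hPa, hPb⟩ := (ih hndt).mp (by omega)
        exact ⟨a, List.mem_cons_of_mem _ ha, b, List.mem_cons_of_mem _ hb, hab, hPa, hPb⟩
    · rintro ⟨a, ha, b, hb, hab, hPa, hPb⟩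
      rcases List.mem_cons.mp ha with rfl | ha'
      · rcases List.mem_cons.mp hb with rfl | hb'
        · exact absurd rfl hab
        · have : 1 ≤ t.countP P := List.countP_pos_iff.mpr ⟨b, hb', hPb⟩
          rw [if_pos hPa]; omega
      · rcases List.mem_cons.mp hb with rfl | hb'
        · have : 1 ≤ t.countP P := List.countP_pos_iff.mpr ⟨a, ha', hPa⟩
          rw [if_pos hPb]; omega
        · have h2 := (ih hndt).mpr ⟨a, ha', b, hb', hab, hPa, hPb⟩
          split_ifs <;> omega

lemma pvCounts_getD (l : List (List String)) (k : List String) :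
    (pvCountsB (l.drop 1)).getD k 0 = (((l.drop 1).map pvKeyB).count k : Int) := by
  unfold pvCountsB
  rw [← PySem.Dict.getD_counter, ← PySem.Dict.foldl_insert_getD_add_one_eq_counter,
    List.foldl_map]

-- the count-≥-2 guard of B says exactly "this record has a duplicate"
lemma pvGuard_iff {l : List (List String)} (hpre : Pre_edit_double_record l) {p : Nat}
    (hp : 1 ≤ p) (hpn : p < l.length) :
    ((pvCountsB (l.drop 1)).getD (pvKeyB (l.getD p [])) 0 ≥ 2) ↔ pvDup l p := by
  rw [pvCounts_getD, pvDrop_eq_map, List.map_map, ge_iff_le, show ((2:Int) = ((2:Nat):Int)) from rfl,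
    Int.ofNat_le, List.count_eq_countP, List.countP_map]
  have hcongr : List.countP ((fun x => x == pvKeyB (l.getD p [])) ∘ (pvKeyB ∘ fun q => l.getD q []))
      (pvIdxs l) = List.countP (fun q => decide (pvKey l q = pvKey l p)) (pvIdxs l) := by
    apply List.countP_congr
    intro q hq
    have hq' := List.mem_range'_1.mp hq
    have hq1 : 1 ≤ q := hq'.1
    have hqn : q < l.length := by have := hq'.2; omega
    simp only [Function.comp_apply, pvKeyB_eq, beq_iff_eq, decide_eq_true_eq]
    exact pvKeyB_bridge hpre hp hpn hq1 hqn
  rw [hcongr]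
  have hnd : (pvIdxs l).Nodup := by unfold pvIdxs; exact List.nodup_range' 1
  rw [pvTwo_le_countP _ _ hnd]
  constructor
  · rintro ⟨a, ha, b, hb, hab, hPa, hPb⟩
    have ha' := List.mem_range'_1.mp ha
    have hb' := List.mem_range'_1.mp hb
    by_cases hap : a = p
    · exact ⟨b, hb'.1, by omega, fun h => hab (by omega), of_decide_eq_true hPb⟩
    · exact ⟨a, ha'.1, by omega, hap, of_decide_eq_true hPa⟩
  · rintro ⟨q, hq1, hqn, hqp, hk⟩
    refine ⟨q, List.mem_range'_1.mpr ⟨hq1, by omega⟩, p, List.mem_range'_1.mpr ⟨hp, by omega⟩,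
      hqp, decide_eq_true hk, decide_eq_true rfl⟩

lemma pvDup_len7 {l : List (List String)} (hpre : Pre_edit_double_record l) {p : Nat}
    (hp : 1 ≤ p) (hpn : p < l.length) (hdup : pvDup l p) : 7 ≤ (l.getD p []).length := by
  obtain ⟨q, hq1, hqn, hqp, hk⟩ := hdup
  exact (pvPre_len7' hpre hp hpn hq1 hqn hqp hk).2

-- the inner `for f in range(2, 7)` body of B's second pass
def pvInnerB (row : List String) (d : PySem.Dict (List String × Int) String) (f : Int) :
    PySem.Dict (List String × Int) String :=
  if ¬ d.contains (pvKeyB row, f) ∧ PySem.List.pyGetD row f "" ≠ "" then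
    d.insert (pvKeyB row, f) (PySem.List.pyGetD row f "")
  else d
lemma pvRange27 : PySem.List.pyRange 2 7 1 = [2, 3, 4, 5, 6] := by decide
lemma pvFirstsB_eq (counts : PySem.Dict (List String) Int) (rest : List (List String)) :
    pvFirstsB counts rest = rest.foldl (fun d row =>
      if counts.getD (pvKeyB row) 0 ≥ 2 then
        ([2, 3, 4, 5, 6] : List Int).foldl (pvInnerB row) d
      else d) PySem.Dict.empty := by
  unfold pvFirstsB pvInnerB
  rw [pvRange27]

lemma pvInnerB_pres_f (row : List String) (k : List String) (f : Int) :
    ∀ (fs : List Int) (d : PySem.Dict (List String × Int) String), f ∉ fs →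
      (fs.foldl (pvInnerB row) d).get? (k, f) = d.get? (k, f) := by
  intro fs
  induction fs with
  | nil => intro d _; rfl
  | cons f' t ih =>
    intro d hf
    rw [List.foldl_cons]
    rw [ih _ (by intro h; exact hf (List.mem_cons_of_mem _ h))]
    unfold pvInnerB
    split_ifs with h
    · exact PySem.Dict.get?_insert_of_ne d _ (by
        intro hh
        injection hh with _ h2
        exact hf (h2 ▸ List.mem_cons_self))
    · rfl
lemma pvInnerB_pres_key (row : List String) (k : List String) (f : Int)
    (hk : pvKeyB row ≠ k) :
    ∀ (fs : List Int) (d : PySem.Dict (List String × Int) String),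
      (fs.foldl (pvInnerB row) d).get? (k, f) = d.get? (k, f) := by
  intro fs
  induction fs with
  | nil => intro d; rfl
  | cons f' t ih =>
    intro d
    rw [List.foldl_cons, ih]
    unfold pvInnerB
    split_ifs with h
    · exact PySem.Dict.get?_insert_of_ne d _ (by
        intro hh
        injection hh with h1 _
        exact hk h1.symm)
    · rfl
lemma pvInnerB_hit (row : List String) (k : List String) (f : Int)
    (hk : pvKeyB row = k) :
    ∀ (fs : List Int) (d : PySem.Dict (List String × Int) String), f ∈ fs → fs.Nodup →
      (fs.foldl (pvInnerB row) d).get? (k, f) =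
        if (d.get? (k, f)).isSome then d.get? (k, f)
        else if PySem.List.pyGetD row f "" ≠ "" then some (PySem.List.pyGetD row f "")
        else none := by
  intro fs
  induction fs with
  | nil => intro d h; simp at h
  | cons f' t ih =>
    intro d hf hnd
    rw [List.foldl_cons]
    by_cases hff : f' = f
    · subst hff
      have hft : f' ∉ t := (List.nodup_cons.mp hnd).1
      rw [pvInnerB_pres_f row k f' t _ hft]
      unfold pvInnerB
      rw [hk]
      rcases hd : d.get? (k, f') with _ | v
      · have hcont : d.contains (k, f') = false := by
          rw [PySem.Dict.contains_eq_isSome_get?, hd]; rfl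
        by_cases hne : PySem.List.pyGetD row f' "" ≠ ""
        · rw [if_pos ⟨by rw [hcont]; simp, hne⟩]
          rw [PySem.Dict.get?_insert_self]
          simp [hd, hne]
        · rw [if_neg (by intro hh; exact hne hh.2)]
          simp [hd, hne]
      · have hcont : d.contains (k, f') = true := by
          rw [PySem.Dict.contains_eq_isSome_get?, hd]; rfl
        rw [if_neg (by intro hh; rw [hcont] at hh; simp at hh)]
        simp [hd]
    · have hft : f ∈ t := by
        rcases List.mem_cons.mp hf with h | h
        · exact absurd h.symm hff
        · exact h
      have hd1 : (pvInnerB row d f').get? (k, f) = d.get? (k, f) := by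
        unfold pvInnerB
        split_ifs with h
        · exact PySem.Dict.get?_insert_of_ne d _ (by
            intro hh
            injection hh with _ h2
            exact hff h2.symm)
        · rfl
      rw [ih _ hft (List.nodup_cons.mp hnd).2, hd1]

lemma pvFirstsB_get? (counts : PySem.Dict (List String) Int) (k : List String) (f : Int)
    (hk2 : counts.getD k 0 ≥ 2) (hf : f ∈ ([2, 3, 4, 5, 6] : List Int)) :
    ∀ (rows : List (List String)) (d : PySem.Dict (List String × Int) String),
      ((rows.foldl (fun d row =>
        if counts.getD (pvKeyB row) 0 ≥ 2 then
          ([2, 3, 4, 5, 6] : List Int).foldl (pvInnerB row) d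
        else d) d).get? (k, f)) =
      if (d.get? (k, f)).isSome then d.get? (k, f)
      else (rows.find? (fun row => (pvKeyB row == k) &&
              !(PySem.List.pyGetD row f "" == ""))).map
             (fun row => PySem.List.pyGetD row f "") := by
  intro rows
  induction rows with
  | nil =>
    intro d
    rcases hd : d.get? (k, f) with _ | v <;> simp [hd]
  | cons row t ih =>
    intro d
    rw [List.foldl_cons, List.find?_cons]
    by_cases hkey : pvKeyB row = k
    · rw [if_pos (by rw [hkey]; exact hk2)] at *
      have hd1 := pvInnerB_hit row k f hkey ([2, 3, 4, 5, 6] : List Int) d hf (by decide)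
      by_cases hne : PySem.List.pyGetD row f "" ≠ ""
      · have hpred : ((pvKeyB row == k) && !(PySem.List.pyGetD row f "" == "")) = true := by
          simp [hkey, hne]
        rw [hpred]
        rw [ih]
        rcases hd : d.get? (k, f) with _ | v
        · rw [hd] at hd1
          rw [hd1]
          simp [hne]
        · rw [hd] at hd1
          rw [hd1]
          simp
      · have hpred : ((pvKeyB row == k) && !(PySem.List.pyGetD row f "" == "")) = false := by
          simp at hne
          simp [hkey, hne]
        rw [hpred]
        rw [ih]
        rcases hd : d.get? (k, f) with _ | v
        · rw [hd] at hd1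
          simp only [Option.isSome_none, Bool.false_eq_true, if_false, if_neg hne] at hd1
          rw [hd1]
        · rw [hd] at hd1
          simp only [Option.isSome_some, if_true] at hd1
          rw [hd1]
    · have hd1 : ((if counts.getD (pvKeyB row) 0 ≥ 2 then
          ([2, 3, 4, 5, 6] : List Int).foldl (pvInnerB row) d else d)).get? (k, f) =
          d.get? (k, f) := by
        split_ifs with h
        · exact pvInnerB_pres_key row k f hkey _ d
        · rfl
      have hpred : ((pvKeyB row == k) && !(PySem.List.pyGetD row f "" == "")) = false := by
        simp [hkey]
      rw [hpred, ih, hd1]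

lemma pvFind_congr {α : Type} (P Q : α → Bool) :
    ∀ xs : List α, (∀ x ∈ xs, P x = Q x) → xs.find? P = xs.find? Q
  | [], _ => rfl
  | x :: t, h => by
    rw [List.find?_cons, List.find?_cons, h x List.mem_cons_self,
      pvFind_congr P Q t (fun y hy => h y (List.mem_cons_of_mem _ hy))]

lemma pvFirsts_getD {l : List (List String)} (hpre : Pre_edit_double_record l) {p : Nat}
    (hp : 1 ≤ p) (hpn : p < l.length) (hdup : pvDup l p) (b : Nat) (hb2 : 2 ≤ b) (hb7 : b < 7) :
    (pvFirstsB (pvCountsB (l.drop 1)) (l.drop 1)).getD (pvKeyB (l.getD p []), ((b : Nat) : Int)) "" =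
      (match pvM l (pvKey l p) b with
        | some m => pvF l m b
        | none => "") := by
  have hf : ((b : Nat) : Int) ∈ ([2, 3, 4, 5, 6] : List Int) := by
    interval_cases b <;> decide
  have hk2 := (pvGuard_iff hpre hp hpn).mpr hdup
  rw [PySem.Dict.getD_eq_get?_getD, pvFirstsB_eq,
    pvFirstsB_get? _ _ _ hk2 hf (l.drop 1) PySem.Dict.empty]
  rw [PySem.Dict.get?_empty]
  simp only [Option.isSome_none, Bool.false_eq_true, if_false]
  rw [pvDrop_eq_map, List.find?_map]
  have hpt : ∀ q ∈ pvIdxs l,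
      ((fun row => (pvKeyB row == pvKeyB (l.getD p [])) &&
        !(PySem.List.pyGetD row ((b : Nat) : Int) "" == "")) ∘ (fun q => l.getD q [])) q =
      pvMB l (pvKey l p) b q := by
    intro q hq
    have hq' := List.mem_range'_1.mp hq
    have hq1 : 1 ≤ q := hq'.1
    have hqn : q < l.length := by have := hq'.2; omega
    simp only [Function.comp_apply]
    unfold pvMB
    rw [PySem.List.pyGetD_natCast]
    have hiff := pvKeyB_bridge hpre hp hpn hq1 hqn
    congr 1
    · rw [pvKeyB_eq, pvKeyB_eq]
      by_cases h : pvKey l q = pvKey l p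
      · rw [hiff.mpr h]
        simp [h]
      · have hne : ¬ (l.getD q []).take 2 = (l.getD p []).take 2 := fun hc => h (hiff.mp hc)
        rw [beq_eq_false_iff_ne.mpr hne]
        simp [h]
  rw [pvFind_congr _ _ _ hpt]
  have hMeq : (pvIdxs l).find? (pvMB l (pvKey l p) b) = pvM l (pvKey l p) b := rfl
  rw [hMeq]
  rcases hm : pvM l (pvKey l p) b with _ | m
  · rfl
  · simp only [Option.map_some, Option.getD_some]
    rw [PySem.List.pyGetD_natCast]
    rfl

-- B's third-pass row rebuild, field by field
def pvBMix (l : List (List String)) (p b : Nat) : Nat → String := fun f =>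
  if f < b then pvEVal l p f else pvF l p f

lemma pvBStep (l : List (List String)) (hpre : Pre_edit_double_record l) (p : Nat)
    (hp : 1 ≤ p) (hpn : p < l.length) (hdup : pvDup l p) (h7 : 7 ≤ (l.getD p []).length)
    (b : Nat) (hb2 : 2 ≤ b) (hb7 : b < 7) :
    (if PySem.List.pyGetD (pvRowOf (l.getD p []) (pvBMix l p b)) ((b : Nat) : Int) "" = ""
     then PySem.List.pySetD (pvRowOf (l.getD p []) (pvBMix l p b)) ((b : Nat) : Int)
       ((pvFirstsB (pvCountsB (l.drop 1)) (l.drop 1)).getD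
         (pvKeyB (l.getD p []), ((b : Nat) : Int)) "")
     else pvRowOf (l.getD p []) (pvBMix l p b)) = pvRowOf (l.getD p []) (pvBMix l p (b + 1)) := by
  have hread : PySem.List.pyGetD (pvRowOf (l.getD p []) (pvBMix l p b)) ((b : Nat) : Int) "" =
      pvF l p b := by
    rw [PySem.List.pyGetD_natCast, pvRowOf_getD,
      if_pos ⟨hb2, hb7, by omega⟩]
    unfold pvBMix
    rw [if_neg (by omega)]
  rw [hread]
  by_cases hF : pvF l p b = ""
  · rw [if_pos hF, PySem.List.pySetD_natCast, pvRowOf_set _ _ _ ⟨hb2, hb7⟩,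
      pvFirsts_getD hpre hp hpn hdup b hb2 hb7]
    apply pvRowOf_congr
    intro f hf2 hf7
    by_cases hfb : f = b
    · subst hfb
      rw [Function.update_self]
      unfold pvBMix
      rw [if_pos (by omega)]
      unfold pvEVal
      rw [if_pos ⟨hp, hpn, hF⟩]
    · rw [Function.update_of_ne hfb]
      unfold pvBMix
      by_cases hlt : f < b
      · rw [if_pos hlt, if_pos (by omega)]
      · rw [if_neg hlt, if_neg (by omega)]
  · rw [if_neg hF]
    apply pvRowOf_congr
    intro f hf2 hf7
    unfold pvBMix
    by_cases hfb : f = b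
    · subst hfb
      rw [if_neg (by omega), if_pos (by omega)]
      unfold pvEVal
      rw [if_neg (by intro hh; exact hF hh.2.2)]
    · by_cases hlt : f < b
      · rw [if_pos hlt, if_pos (by omega)]
      · rw [if_neg hlt, if_neg (by omega)]

lemma pvMerge_eq_fill (l : List (List String)) (hpre : Pre_edit_double_record l) (p : Nat)
    (hp : 1 ≤ p) (hpn : p < l.length) :
    pvMergeRowB (pvCountsB (l.drop 1)) (pvFirstsB (pvCountsB (l.drop 1)) (l.drop 1))
      (l.getD p []) = pvFill l p := by
  unfold pvMergeRowB
  by_cases hg : (pvCountsB (l.drop 1)).getD (pvKeyB (l.getD p [])) 0 ≥ 2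
  · rw [if_pos hg, pvRange27]
    have hdup := (pvGuard_iff hpre hp hpn).mp hg
    have h7 := pvDup_len7 hpre hp hpn hdup
    simp only [List.foldl_cons, List.foldl_nil]
    have hbase : pvRowOf (l.getD p []) (pvBMix l p 2) = l.getD p [] := by
      have h1 : pvRowOf (l.getD p []) (pvBMix l p 2) =
          pvRowOf (l.getD p []) (fun f => (l.getD p []).getD f "") :=
        pvRowOf_congr (fun f hf2 hf7 => by
          unfold pvBMix
          rw [if_neg (by omega)]
          rfl)
      rw [h1, pvRowOf_self]
    have c2 : (2 : Int) = ((2 : Nat) : Int) := rfl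
    have c3 : (3 : Int) = ((3 : Nat) : Int) := rfl
    have c4 : (4 : Int) = ((4 : Nat) : Int) := rfl
    have c5 : (5 : Int) = ((5 : Nat) : Int) := rfl
    have c6 : (6 : Int) = ((6 : Nat) : Int) := rfl
    have e2 := pvBStep l hpre p hp hpn hdup h7 2 (by omega) (by omega)
    rw [hbase] at e2
    rw [c2, c3, c4, c5, c6, e2]
    rw [pvBStep l hpre p hp hpn hdup h7 3 (by omega) (by omega),
      pvBStep l hpre p hp hpn hdup h7 4 (by omega) (by omega),
      pvBStep l hpre p hp hpn hdup h7 5 (by omega) (by omega),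
      pvBStep l hpre p hp hpn hdup h7 6 (by omega) (by omega)]
    unfold pvFill
    apply pvRowOf_congr
    intro f hf2 hf7
    unfold pvBMix
    rw [if_pos (by omega)]
  · rw [if_neg hg]
    have hnd : ¬ pvDup l p := fun hdup => hg ((pvGuard_iff hpre hp hpn).mpr hdup)
    have hfill : pvFill l p = l.getD p [] := by
      unfold pvFill
      have h1 : pvRowOf (l.getD p []) (pvEVal l p) =
          pvRowOf (l.getD p []) (fun f => (l.getD p []).getD f "") := by
        apply pvRowOf_congr
        intro f hf2 hf7
        unfold pvEVal
        by_cases hF : (1 ≤ p ∧ p < l.length ∧ pvF l p f = "")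
        · rw [if_pos hF]
          rcases hm : pvM l (pvKey l p) f with _ | m
          · exact hF.2.2.symm
          · exfalso
            obtain ⟨hm1, hm2, hmk, hmne⟩ := pvM_spec hm
            exact hnd ⟨m, hm1, by omega, fun hh => hmne (hh ▸ hF.2.2), hmk⟩
        · rw [if_neg hF]
          rfl
      rw [h1, pvRowOf_self]
    rw [hfill]

lemma pvFill_zero (l : List (List String)) : pvFill l 0 = l.getD 0 [] := by
  unfold pvFill
  have h1 : pvRowOf (l.getD 0 []) (pvEVal l 0) =
      pvRowOf (l.getD 0 []) (fun f => (l.getD 0 []).getD f "") := by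
    apply pvRowOf_congr
    intro f hf2 hf7
    unfold pvEVal
    rw [if_neg (by intro hh; omega)]
    rfl
  rw [h1, pvRowOf_self]

-- B computes the spec
lemma pvB_eq_spec (l : List (List String)) (hpre : Pre_edit_double_record l) :
    edit_double_record_alt l = pvSpecRes l := by
  by_cases hlen0 : l.length = 0
  · have : l = [] := List.length_eq_zero_iff.mp hlen0
    subst this
    rfl
  · have hn1 : 1 ≤ l.length := by omega
    simp only [edit_double_record_alt]
    rw [PySem.List.slice_from l (by norm_num), PySem.List.slice_to l (by norm_num)]
    simp only [Int.toNat_one]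
    rw [PySem.List.foldl_append_singleton_eq_map]
    apply List.ext_getElem?
    intro i
    rw [List.getElem?_append]
    have hlt1 : (List.take 1 l).length = 1 := by
      rw [List.length_take]
      omega
    by_cases hi0 : i < (List.take 1 l).length
    · have hi0' : i = 0 := by omega
      subst hi0'
      rw [if_pos hi0, List.getElem?_take]
      rw [if_pos (by omega)]
      unfold pvSpecRes
      rw [List.getElem?_map, List.getElem?_range (by omega), Option.map_some, pvFill_zero]
      rw [List.getElem?_eq_getElem (by omega)]
      rw [List.getD_eq_getElem l [] (by omega)]
    · rw [if_neg hi0]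
      rw [hlt1] at hi0 ⊢
      have hi1 : 1 ≤ i := by omega
      rw [List.getElem?_map, List.getElem?_drop]
      unfold pvSpecRes
      rw [List.getElem?_map]
      by_cases hin : i < l.length
      · rw [List.getElem?_eq_getElem (show 1 + (i - 1) < l.length by omega),
          List.getElem?_range hin, Option.map_some, Option.map_some]
        have hgd : l[1 + (i - 1)] = l.getD i [] := by
          rw [List.getD_eq_getElem l [] hin]
          congr 1
          omega
        rw [hgd, pvMerge_eq_fill l hpre i hi1 hin]
      · rw [List.getElem?_eq_none_iff.mpr (by omega), List.getElem?_eq_none_iff.mpr (by simp; omega)]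
        rfl

-- ===== VERDICT (by name: the statement is the Claim_ definition above) =====
theorem edit_double_record_spec : Claim_equal_edit_double_record := by
  intro l _ hpre
  unfold Spec_edit_double_record
  rw [pvA_eq_spec l hpre, pvB_eq_spec l hpre]
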